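-- pv_equiv track=rewrite | github.com/SantaJordan/blueprint-gtm-playbooks | blueprint-worker/references/data_moat_verticals.py | convert_to_niche
-- ===== SOURCE A (Python) =====
-- from typing import Dict, List, Optional, Tuple
--
-- NICHE_CONVERSIONS = {
--     # Generic -> Specific regulated niche
--     "healthcare": ["nursing_homes", "medical_practices", "pharmacies"],
--     "transportation": ["trucking"],
--     "manufacturing": ["manufacturing_epa", "food_manufacturing"],
--     "construction": ["construction_osha"],
--     "food_service": ["restaurants", "food_manufacturing"],
--     "hospitality": ["hotels", "restaurants"],
--     "financial_services": ["insurance_agencies", "mortgage_lenders"],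
--
--     # Already specific - no conversion needed
--     "skilled_nursing": ["nursing_homes"],
--     "trucking": ["trucking"],
--     "pharmacy": ["pharmacies"],
--     "restaurants": ["restaurants"],
-- }
--
-- def convert_to_niche(generic_vertical: str) -> List[str]:
--     """
--     Convert a generic vertical to specific regulated niches.
--
--     Returns list of niche names that have strong data moats.
--     """
--     vertical_lower = generic_vertical.lower().replace(" ", "_").replace("-", "_")
--
--     # Check conversions
--     if vertical_lower in NICHE_CONVERSIONS:
--         return NICHE_CONVERSIONS[vertical_lower]
--
--     # Check if already a specific niche
--     for niche_list in NICHE_CONVERSIONS.values():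
--         if vertical_lower in niche_list:
--             return [vertical_lower]
--
--     return []  # No conversion available
-- ===== SOURCE B (Python) =====
-- from typing import Dict, List
--
-- NICHE_CONVERSIONS = {
--     "healthcare": ["nursing_homes", "medical_practices", "pharmacies"],
--     "transportation": ["trucking"],
--     "manufacturing": ["manufacturing_epa", "food_manufacturing"],
--     "construction": ["construction_osha"],
--     "food_service": ["restaurants", "food_manufacturing"],
--     "hospitality": ["hotels", "restaurants"],
--     "financial_services": ["insurance_agencies", "mortgage_lenders"],
--     "skilled_nursing": ["nursing_homes"],
--     "trucking": ["trucking"],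
--     "pharmacy": ["pharmacies"],
--     "restaurants": ["restaurants"],
-- }
--
-- # Merged lookup table built once: forward entries, plus every niche name
-- # (that is not already a forward key) mapping to itself.
-- _MERGED: Dict[str, List[str]] = dict(NICHE_CONVERSIONS)
-- for _name_list in NICHE_CONVERSIONS.values():
--     for _name in _name_list:
--         _MERGED.setdefault(_name, [_name])
--
-- def convert_to_niche(generic_vertical: str) -> List[str]:
--     vertical_lower = generic_vertical.lower().replace(" ", "_").replace("-", "_")
--     return _MERGED.get(vertical_lower, [])
-- ===== Notes on version B (the rewrite author's own statement) =====
-- stated objective: simpler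
-- what changed: Replaces the runtime scan over all NICHE_CONVERSIONS value lists with a module-level merged reverse-lookup dict (built once), so convert_to_niche is a single normalized lookup with default.
import Mathlib
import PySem

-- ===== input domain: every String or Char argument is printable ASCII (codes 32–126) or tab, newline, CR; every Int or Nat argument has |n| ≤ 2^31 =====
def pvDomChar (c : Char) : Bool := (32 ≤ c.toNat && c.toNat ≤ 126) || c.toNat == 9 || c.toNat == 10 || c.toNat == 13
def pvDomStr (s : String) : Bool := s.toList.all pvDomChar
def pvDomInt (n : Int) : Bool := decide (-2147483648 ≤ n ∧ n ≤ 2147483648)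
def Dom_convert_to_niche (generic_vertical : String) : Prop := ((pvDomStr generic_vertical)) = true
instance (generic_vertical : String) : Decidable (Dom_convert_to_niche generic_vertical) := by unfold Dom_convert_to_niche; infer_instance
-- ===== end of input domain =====

-- B replaces A's runtime scan over all NICHE_CONVERSIONS value lists with a merged
-- lookup table built once at module level; objective: simpler (one lookup per call).

-- ===== PORT A =====
def NICHE_CONVERSIONS : PySem.Dict String (List String) := PySem.Dict.ofList [
  ("healthcare", ["nursing_homes", "medical_practices", "pharmacies"]),
  ("transportation", ["trucking"]),
  ("manufacturing", ["manufacturing_epa", "food_manufacturing"]),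
  ("construction", ["construction_osha"]),
  ("food_service", ["restaurants", "food_manufacturing"]),
  ("hospitality", ["hotels", "restaurants"]),
  ("financial_services", ["insurance_agencies", "mortgage_lenders"]),
  ("skilled_nursing", ["nursing_homes"]),
  ("trucking", ["trucking"]),
  ("pharmacy", ["pharmacies"]),
  ("restaurants", ["restaurants"])]

-- the 'for niche_list in NICHE_CONVERSIONS.values(): if vertical_lower in niche_list: return [vertical_lower]' loop
def scanValuesA (vlists : List (List String)) (v : String) : List String :=
  match vlists with
  | [] => []
  | niche_list :: rest => if niche_list.contains v then [v] else scanValuesA rest v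

def convert_to_niche (generic_vertical : String) : List String :=
  let vertical_lower :=
    PySem.Str.replace (PySem.Str.replace (PySem.Str.lower generic_vertical) " " "_") "-" "_"
  match PySem.Dict.get? NICHE_CONVERSIONS vertical_lower with
  | some l => l
  | none => scanValuesA (PySem.Dict.values NICHE_CONVERSIONS) vertical_lower

-- ===== PORT B =====
-- merged table: forward entries plus every niche name (setdefault keeps forward precedence)
def MERGED : PySem.Dict String (List String) :=
  (PySem.Dict.values NICHE_CONVERSIONS).foldl
    (fun d name_list =>
      name_list.foldl (fun d name => PySem.Dict.setdefault d name [name]) d)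
    NICHE_CONVERSIONS

def convert_to_niche_alt (generic_vertical : String) : List String :=
  let vertical_lower :=
    PySem.Str.replace (PySem.Str.replace (PySem.Str.lower generic_vertical) " " "_") "-" "_"
  PySem.Dict.getD MERGED vertical_lower []

-- ===== PRECONDITION & SPEC =====
def Spec_convert_to_niche (generic_vertical : String) (out : List String) : Prop := out = convert_to_niche_alt generic_vertical
instance (generic_vertical : String) (out : List String) : Decidable (Spec_convert_to_niche generic_vertical out) := by unfold Spec_convert_to_niche; infer_instance

-- ===== CLAIM (what is proved, stated in full; the proofs are below) =====
def Claim_equal_convert_to_niche : Prop := ∀ (generic_vertical : String), Dom_convert_to_niche generic_vertical → Spec_convert_to_niche generic_vertical (convert_to_niche generic_vertical)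

-- ===== LEMMAS AND PROOFS =====

theorem core_eq (v : String) :
    (match PySem.Dict.get? NICHE_CONVERSIONS v with
     | some l => l
     | none => scanValuesA (PySem.Dict.values NICHE_CONVERSIONS) v)
      = PySem.Dict.getD MERGED v [] := by
  by_cases h1 : v = "healthcare"
  · subst h1; decide
  by_cases h2 : v = "transportation"
  · subst h2; decide
  by_cases h3 : v = "manufacturing"
  · subst h3; decide
  by_cases h4 : v = "construction"
  · subst h4; decide
  by_cases h5 : v = "food_service"
  · subst h5; decide
  by_cases h6 : v = "hospitality"
  · subst h6; decide
  by_cases h7 : v = "financial_services"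
  · subst h7; decide
  by_cases h8 : v = "skilled_nursing"
  · subst h8; decide
  by_cases h9 : v = "trucking"
  · subst h9; decide
  by_cases h10 : v = "pharmacy"
  · subst h10; decide
  by_cases h11 : v = "restaurants"
  · subst h11; decide
  by_cases h12 : v = "nursing_homes"
  · subst h12; decide
  by_cases h13 : v = "medical_practices"
  · subst h13; decide
  by_cases h14 : v = "pharmacies"
  · subst h14; decide
  by_cases h15 : v = "manufacturing_epa"
  · subst h15; decide
  by_cases h16 : v = "food_manufacturing"
  · subst h16; decide
  by_cases h17 : v = "construction_osha"
  · subst h17; decide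
  by_cases h18 : v = "hotels"
  · subst h18; decide
  by_cases h19 : v = "insurance_agencies"
  · subst h19; decide
  by_cases h20 : v = "mortgage_lenders"
  · subst h20; decide
  -- v equals none of the forward keys and none of the niche names
  have hN : NICHE_CONVERSIONS = PySem.Dict.mk [("healthcare", ["nursing_homes", "medical_practices", "pharmacies"]), ("transportation", ["trucking"]), ("manufacturing", ["manufacturing_epa", "food_manufacturing"]), ("construction", ["construction_osha"]), ("food_service", ["restaurants", "food_manufacturing"]), ("hospitality", ["hotels", "restaurants"]), ("financial_services", ["insurance_agencies", "mortgage_lenders"]), ("skilled_nursing", ["nursing_homes"]), ("trucking", ["trucking"]), ("pharmacy", ["pharmacies"]), ("restaurants", ["restaurants"])] := by rfl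
  have hM : MERGED = PySem.Dict.mk [("healthcare", ["nursing_homes", "medical_practices", "pharmacies"]), ("transportation", ["trucking"]), ("manufacturing", ["manufacturing_epa", "food_manufacturing"]), ("construction", ["construction_osha"]), ("food_service", ["restaurants", "food_manufacturing"]), ("hospitality", ["hotels", "restaurants"]), ("financial_services", ["insurance_agencies", "mortgage_lenders"]), ("skilled_nursing", ["nursing_homes"]), ("trucking", ["trucking"]), ("pharmacy", ["pharmacies"]), ("restaurants", ["restaurants"]), ("nursing_homes", ["nursing_homes"]), ("medical_practices", ["medical_practices"]), ("pharmacies", ["pharmacies"]), ("manufacturing_epa", ["manufacturing_epa"]), ("food_manufacturing", ["food_manufacturing"]), ("construction_osha", ["construction_osha"]), ("hotels", ["hotels"]), ("insurance_agencies", ["insurance_agencies"]), ("mortgage_lenders", ["mortgage_lenders"])] := by rfl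
  have hV : PySem.Dict.values NICHE_CONVERSIONS = [["nursing_homes", "medical_practices", "pharmacies"], ["trucking"], ["manufacturing_epa", "food_manufacturing"], ["construction_osha"], ["restaurants", "food_manufacturing"], ["hotels", "restaurants"], ["insurance_agencies", "mortgage_lenders"], ["nursing_homes"], ["trucking"], ["pharmacies"], ["restaurants"]] := by rfl
  have hA : PySem.Dict.get? NICHE_CONVERSIONS v = none := by
    rw [hN]; simp [PySem.Dict.get?, Ne.symm h1, Ne.symm h2, Ne.symm h3, Ne.symm h4, Ne.symm h5, Ne.symm h6, Ne.symm h7, Ne.symm h8, Ne.symm h9, Ne.symm h10, Ne.symm h11]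
  have hB : PySem.Dict.getD MERGED v [] = [] := by
    rw [hM, PySem.Dict.getD_eq_get?_getD]; simp [PySem.Dict.get?, Ne.symm h1, Ne.symm h2, Ne.symm h3, Ne.symm h4, Ne.symm h5, Ne.symm h6, Ne.symm h7, Ne.symm h8, Ne.symm h9, Ne.symm h10, Ne.symm h11, Ne.symm h12, Ne.symm h13, Ne.symm h14, Ne.symm h15, Ne.symm h16, Ne.symm h17, Ne.symm h18, Ne.symm h19, Ne.symm h20]
  rw [hA, hB, hV]
  simp [scanValuesA, h9, h11, h12, h13, h14, h15, h16, h17, h18, h19, h20]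

-- ===== VERDICT (by name: the statement is the Claim_ definition above) =====
theorem convert_to_niche_spec : Claim_equal_convert_to_niche := by
  intro v _
  show convert_to_niche v = convert_to_niche_alt v
  simp only [convert_to_niche, convert_to_niche_alt]
  exact core_eq (PySem.Str.replace (PySem.Str.replace (PySem.Str.lower v) " " "_") "-" "_")
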